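-- pv_equiv track=rewrite | github.com/kamekishi/fota_dashboard | ota.py | _adp_shuffle
-- ===== SOURCE A (Python) =====
-- def _adp_shuffle(var0):
--     var1 = len(var0); var2 = var1 % 2; var3 = var1 // 2
--     if var2 != 0: var3 += 1
--     char_list = list(var0)
--     while var3 < var1:
--         var4 = char_list.pop(var3); var5 = var1 - var3
--         if var2 == 0: var5 -= 1
--         char_list.insert(var5, var4); var3 += 1
--     return "".join(char_list)
-- ===== SOURCE B (Python) =====
-- def _adp_shuffle(var0):
--     n = len(var0)
--     h = (n + 1) // 2
--     a = var0[:h]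
--     b = var0[h:][::-1]
--     if n % 2 == 0:
--         return "".join(x + y for x, y in zip(b, a))
--     return "".join(x + y for x, y in zip(a, b)) + a[h - 1]
-- ===== Notes on version B (the rewrite author's own statement) =====
-- stated objective: faster
-- what changed: A repeatedly pops the element at the middle index and re-inserts it near the front (each pop/insert shifts the whole list); B computes the result directly in one pass by zipping the first half of the string with the reversed second half and interleaving them.
import Mathlib
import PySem

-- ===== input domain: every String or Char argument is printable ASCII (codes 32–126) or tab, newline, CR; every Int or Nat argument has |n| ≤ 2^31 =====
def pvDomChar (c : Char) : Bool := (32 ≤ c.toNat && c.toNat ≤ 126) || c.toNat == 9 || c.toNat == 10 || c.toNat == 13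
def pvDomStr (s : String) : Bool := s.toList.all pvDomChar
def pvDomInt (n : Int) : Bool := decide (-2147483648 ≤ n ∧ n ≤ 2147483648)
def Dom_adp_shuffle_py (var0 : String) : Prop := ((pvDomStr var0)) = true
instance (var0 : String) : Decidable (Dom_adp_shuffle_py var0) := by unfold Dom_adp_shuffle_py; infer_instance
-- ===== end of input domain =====

-- B replaces A's quadratic pop/insert loop with a one-pass interleave of the two string halves
-- (objective: faster; a timing run measures the difference).

-- ===== PORT A =====
-- the while loop: pop at var3, insert at var5, until var3 reaches var1
def adpLoopA (var1 var2 : Int) (var3 : Int) (cl : List Char) : List Char :=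
  if _h : var3 < var1 then
    match PySem.List.pop? cl var3 with
    | none => cl   -- unreachable IndexError guard (var3 is always a valid index)
    | some (var4, cl') =>
      let var5 := var1 - var3
      let var5 := if var2 == 0 then var5 - 1 else var5
      adpLoopA var1 var2 (var3 + 1) (PySem.List.insert cl' var5 var4)
  else cl
termination_by (var1 - var3).toNat
decreasing_by omega

def adp_shuffle_py (var0 : String) : String :=
  let var1 : Int := PySem.Str.len var0
  let var2 : Int := PySem.Int.mod var1 2
  let var3 : Int := PySem.Int.floordiv var1 2
  let var3 : Int := if var2 ≠ 0 then var3 + 1 else var3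
  let char_list : List Char := var0.toList
  String.ofList (adpLoopA var1 var2 var3 char_list)

-- ===== PORT B =====
def adp_shuffle_py_alt (var0 : String) : String :=
  let s : List Char := var0.toList
  let n : Int := PySem.Str.len var0
  let h : Int := PySem.Int.floordiv (n + 1) 2
  let a : List Char := PySem.List.slice s none (some h)
  let b : List Char := (PySem.List.slice? (PySem.List.slice s (some h) none) none none (-1)).getD []
  if PySem.Int.mod n 2 == 0 then
    String.ofList ((b.zip a).flatMap (fun p => [p.1, p.2]))
  else
    match PySem.List.pyGet? a (h - 1) with
    | some c => String.ofList ((a.zip b).flatMap (fun p => [p.1, p.2]) ++ [c])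
    | none => ""   -- unreachable IndexError guard (n odd means a is nonempty)

-- ===== PRECONDITION & SPEC =====
def Spec_adp_shuffle_py (var0 : String) (out : String) : Prop := out = adp_shuffle_py_alt var0
instance (var0 : String) (out : String) : Decidable (Spec_adp_shuffle_py var0 out) := by unfold Spec_adp_shuffle_py; infer_instance

-- ===== CLAIM (what is proved, stated in full; the proofs are below) =====
def Claim_equal_adp_shuffle_py : Prop := ∀ (var0 : String), Dom_adp_shuffle_py var0 → Spec_adp_shuffle_py var0 (adp_shuffle_py var0)

-- ===== LEMMAS AND PROOFS =====

-- alternating interleave, starting with the first list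
def itl : List Char → List Char → List Char
  | [], ys => ys
  | x :: xs, [] => x :: xs
  | x :: xs, y :: ys => x :: y :: itl xs ys

lemma itl_cons_left : ∀ (ys : List Char) (x : Char) (xs : List Char),
    itl (x :: xs) ys = x :: itl ys xs := by
  intro ys
  induction ys with
  | nil => intro x xs; cases xs <;> rfl
  | cons y ys ih =>
    intro x xs
    cases xs with
    | nil => rfl
    | cons a xs' => simp [itl, ih a xs']

lemma itl_length : ∀ X Y : List Char, (itl X Y).length = X.length + Y.length := by
  intro X
  induction X with
  | nil => intro Y; simp [itl]
  | cons x X ih =>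
    intro Y
    cases Y with
    | nil => simp [itl]
    | cons y Y => simp [itl, ih Y]; omega

lemma itl_zip_eq : ∀ (X Y : List Char), X.length = Y.length →
    itl X Y = (X.zip Y).flatMap (fun p => [p.1, p.2]) := by
  intro X
  induction X with
  | nil => intro Y h; cases Y <;> simp_all [itl]
  | cons x X ih =>
    intro Y h
    cases Y with
    | nil => simp at h
    | cons y Y =>
      simp only [List.length_cons, Nat.succ_inj] at h
      simp [itl, ih Y h]

lemma zip_append_right_of_length_eq : ∀ (X Y Z : List Char), X.length = Y.length →
    (X ++ Z).zip Y = X.zip Y := by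
  intro X
  induction X with
  | nil => intro Y Z h; cases Y <;> simp_all
  | cons x X ih =>
    intro Y Z h
    cases Y with
    | nil => simp at h
    | cons y Y =>
      simp only [List.length_cons, Nat.succ_inj] at h
      simp [ih Y Z h]

lemma itl_zip_succ : ∀ (X Y : List Char) (x : Char), X.length = Y.length →
    itl (X ++ [x]) Y = (X.zip Y).flatMap (fun p => [p.1, p.2]) ++ [x] := by
  intro X
  induction X with
  | nil => intro Y x h; cases Y <;> simp_all [itl]
  | cons a X ih =>
    intro Y x h
    cases Y with
    | nil => simp at h
    | cons b Y =>
      simp only [List.length_cons, Nat.succ_inj] at h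
      simp [itl, ih Y x h]

-- the state of A's loop before the iteration with var3 = h + j, where i + j = h
def midState (s : List Char) (h i j : Nat) : List Char :=
  s.take i ++ (itl ((s.drop h).take j).reverse ((s.drop i).take j) ++ s.drop (h + j))

lemma loop_inv (s : List Char) (var2 : Int) (h : Nat)
    (hpar : var2 = 0 ↔ s.length % 2 = 0)
    (hh : (s.length + 1) / 2 = h) :
    ∀ d j i, i + j = h → j + d = s.length - h →
      adpLoopA (s.length : Int) var2 ((h + j : Nat) : Int) (midState s h i j)
        = midState s h (2 * h - s.length) (s.length - h) := by
  intro d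
  induction d with
  | zero =>
    intro j i hij hjd
    rw [adpLoopA.eq_def, dif_neg (by push_cast; omega)]
    have hi : i = 2 * h - s.length := by omega
    have hj : j = s.length - h := by omega
    rw [hi, hj]
  | succ d ih =>
    intro j i hij hjd
    have hk : h + j < s.length := by omega
    have hi1 : 1 ≤ i := by omega
    have hin : i ≤ s.length := by omega
    have lP : (s.take i ++ itl ((s.drop h).take j).reverse ((s.drop i).take j)).length = h + j := by
      simp [itl_length]; omega
    have lM : (midState s h i j).length = s.length := by
      simp only [midState, ← List.append_assoc, List.length_append, lP]
      simp; omega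
    have hpop : PySem.List.pop? (midState s h i j) ((h + j : Nat) : Int)
        = some ((midState s h i j)[h + j]'(by rw [lM]; omega), (midState s h i j).eraseIdx (h + j)) := by
      apply PySem.List.pop?_natCast
    -- the popped element and the remaining list
    have hM : midState s h i j
        = (s.take i ++ itl ((s.drop h).take j).reverse ((s.drop i).take j)) ++ s.drop (h + j) := by
      rw [midState, List.append_assoc]
    have hget : (midState s h i j)[h + j]'(by rw [lM]; omega) = s[h + j]'hk := by
      rw [List.getElem_of_eq hM]
      rw [List.getElem_append_right (by rw [lP])]
      simp [lP]
    have herase : (midState s h i j).eraseIdx (h + j)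
        = s.take i ++ (itl ((s.drop h).take j).reverse ((s.drop i).take j) ++ s.drop (h + j + 1)) := by
      rw [hM, List.eraseIdx_eq_take_drop_succ]
      rw [List.take_append_of_le_length (by rw [lP]), List.take_of_length_le (by rw [lP])]
      have hdrop : ((s.take i ++ itl ((s.drop h).take j).reverse ((s.drop i).take j)) ++ s.drop (h + j)).drop (h + j + 1)
          = s.drop (h + j + 1) := by
        rw [List.drop_append]
        rw [List.drop_eq_nil_of_le (by rw [lP]; omega), List.nil_append, lP]
        have hq : h + j + 1 - (h + j) = 1 := by omega
        rw [hq, List.drop_drop]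
      rw [hdrop, List.append_assoc]
    -- the insertion position is i - 1 in both parity cases
    have hvar5 : (if (var2 == 0) = true then (s.length : Int) - ((h + j : Nat) : Int) - 1
        else (s.length : Int) - ((h + j : Nat) : Int)) = ((i - 1 : Nat) : Int) := by
      by_cases hp : var2 = 0
      · rw [if_pos (by simp [hp])]
        have hev := hpar.mp hp
        push_cast; omega
      · rw [if_neg (by simp [hp])]
        have hod : s.length % 2 = 1 := by
          rcases Nat.mod_two_eq_zero_or_one s.length with h0 | h1
          · exact absurd (hpar.mpr h0) hp
          · exact h1
        push_cast; omega
    have hins : PySem.List.insert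
          (s.take i ++ (itl ((s.drop h).take j).reverse ((s.drop i).take j) ++ s.drop (h + j + 1)))
          ((i - 1 : Nat) : Int) (s[h + j]'hk)
        = (s.take i ++ (itl ((s.drop h).take j).reverse ((s.drop i).take j) ++ s.drop (h + j + 1))).take (i - 1)
          ++ s[h + j]'hk :: (s.take i ++ (itl ((s.drop h).take j).reverse ((s.drop i).take j) ++ s.drop (h + j + 1))).drop (i - 1) := by
      apply PySem.List.insert_natCast
      simp [itl_length]; omega
    -- the new list is midState s h (i-1) (j+1)
    have hnew : (s.take i ++ (itl ((s.drop h).take j).reverse ((s.drop i).take j) ++ s.drop (h + j + 1))).take (i - 1)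
        ++ s[h + j]'hk :: (s.take i ++ (itl ((s.drop h).take j).reverse ((s.drop i).take j) ++ s.drop (h + j + 1))).drop (i - 1)
        = midState s h (i - 1) (j + 1) := by
      rw [List.take_append_of_le_length (by simp; omega),
          List.drop_append_of_le_length (by simp; omega)]
      rw [List.take_take, Nat.min_eq_left (by omega)]
      have hdt : (s.take i).drop (i - 1) = [s[i - 1]'(by omega)] := by
        rw [List.drop_take]
        have h1 : i - (i - 1) = 1 := by omega
        rw [h1]
        rw [List.take_one_drop_eq_of_lt_length (by omega)]
        simp
      rw [hdt]
      have hR : ((s.drop h).take (j + 1)).reverse = s[h + j]'hk :: ((s.drop h).take j).reverse := by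
        rw [List.take_add_one]
        have hgd : (s.drop h)[j]? = some (s[h + j]'hk) := by
          rw [List.getElem?_drop]
          exact List.getElem?_eq_getElem hk
        rw [hgd]
        simp
      have hS : (s.drop (i - 1)).take (j + 1) = s[i - 1]'(by omega) :: (s.drop i).take j := by
        rw [List.drop_eq_getElem_cons (by omega : i - 1 < s.length)]
        have hi11 : i - 1 + 1 = i := by omega
        rw [hi11, List.take_succ_cons]
      simp only [midState]
      rw [hR, hS]
      have hj1 : h + (j + 1) = h + j + 1 := by omega
      rw [hj1]
      simp [itl]
    have hcast : ((h + j : Nat) : Int) + 1 = ((h + (j + 1) : Nat) : Int) := by push_cast; ring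
    rw [adpLoopA.eq_def, dif_pos (by push_cast; omega), hpop]
    dsimp only
    rw [hget, herase, hvar5, hins, hnew, hcast]
    exact ih (j + 1) (i - 1) (by omega) (by omega)

lemma midState_init (s : List Char) (h : Nat) : midState s h h 0 = s := by
  simp [midState, itl]

lemma ports_eq (var0 : String) : adp_shuffle_py var0 = adp_shuffle_py_alt var0 := by
  unfold adp_shuffle_py adp_shuffle_py_alt
  have hlen : PySem.Str.len var0 = (var0.toList.length : Int) := by
    simp [PySem.Str.len_eq]
  rw [hlen]
  set s : List Char := var0.toList with hs
  set h : Nat := (s.length + 1) / 2 with hh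
  have hdiv1 : PySem.Int.floordiv ((s.length : Int) + 1) 2 = (h : Int) := by
    rw [PySem.Int.floordiv_eq_ediv_of_pos (by norm_num)]
    rw [hh]; omega
  have hmod : PySem.Int.mod (s.length : Int) 2 = ((s.length % 2 : Nat) : Int) := by
    rw [PySem.Int.mod_eq_emod_of_pos (by norm_num)]
    push_cast; rfl
  have hdiv2 : PySem.Int.floordiv (s.length : Int) 2 = ((s.length / 2 : Nat) : Int) := by
    rw [PySem.Int.floordiv_eq_ediv_of_pos (by norm_num)]
    omega
  have hslice_a : PySem.List.slice s none (some (h : Int)) = s.take h :=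
    PySem.List.slice_to_natCast s h
  have hslice_b : (PySem.List.slice? (PySem.List.slice s (some (h : Int)) none) none none (-1)).getD []
      = (s.drop h).reverse := by
    rw [PySem.List.slice_from_natCast, PySem.List.slice?_none_none_neg_one]
    rfl
  simp only [hmod, hdiv1, hdiv2, hslice_a, hslice_b]
  by_cases hpar : s.length % 2 = 0
  · -- even length
    rw [hpar]
    simp only [Nat.cast_zero]
    rw [if_neg (show ¬(0 : Int) ≠ 0 by norm_num),
        if_pos (show (((0 : Int) == 0) = true) by decide)]
    have hstart : ((s.length / 2 : Nat) : Int) = ((h + 0 : Nat) : Int) := by push_cast; omega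
    rw [hstart]
    have hloop := loop_inv s 0 h (by simp [hpar]) hh.symm (s.length - h) 0 h (by omega) (by omega)
    rw [midState_init s h] at hloop
    rw [hloop]
    have hi0 : 2 * h - s.length = 0 := by omega
    have hj0 : s.length - h = h := by omega
    rw [hi0, hj0]
    simp only [midState]
    have h1 : (s.drop h).take h = s.drop h := List.take_of_length_le (by simp; omega)
    have h2 : s.drop (h + h) = [] := List.drop_eq_nil_of_le (by omega)
    rw [h1, h2]
    simp only [List.take_zero, List.drop_zero, List.nil_append, List.append_nil]
    congr 1
    exact itl_zip_eq _ _ (by simp; omega)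
  · -- odd length
    have hpar1 : s.length % 2 = 1 := by omega
    rw [hpar1]
    have hge1 : 1 ≤ s.length := by omega
    have hhge1 : 1 ≤ h := by omega
    simp only [Nat.cast_one]
    rw [if_pos (show (1 : Int) ≠ 0 by norm_num),
        if_neg (show ¬(((1 : Int) == 0) = true) by decide)]
    have hstart : ((s.length / 2 : Nat) : Int) + 1 = ((h + 0 : Nat) : Int) := by omega
    rw [hstart]
    have hloop := loop_inv s 1 h (by constructor <;> intro hx <;> omega) hh.symm
      (s.length - h) 0 h (by omega) (by omega)
    rw [midState_init s h] at hloop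
    rw [hloop]
    have hgetb : PySem.List.pyGet? (s.take h) ((h : Int) - 1) = some (s[h - 1]'(by omega)) := by
      have hcast1 : ((h : Int) - 1) = ((h - 1 : Nat) : Int) := by omega
      rw [hcast1, PySem.List.pyGet?_natCast]
      rw [List.getElem?_eq_getElem (by simp; omega)]
      congr 1
      simp [List.getElem_take]
    rw [hgetb]
    dsimp only
    have hi1 : 2 * h - s.length = 1 := by omega
    have hj1 : s.length - h = h - 1 := by omega
    rw [hi1, hj1]
    simp only [midState]
    have h1 : (s.drop h).take (h - 1) = s.drop h := List.take_of_length_le (by simp; omega)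
    have h2 : s.drop (h + (h - 1)) = [] := List.drop_eq_nil_of_le (by omega)
    rw [h1, h2, List.append_nil]
    congr 1
    -- RHS: flatMap (zip a b) ++ [s[h-1]] = itl a b, and the loop result is itl a b opened one step
    have hsplit : s.take h = s.take (h - 1) ++ [s[h - 1]'(by omega)] := by
      have hq : h = (h - 1) + 1 := by omega
      conv_lhs => rw [hq]
      rw [List.take_add_one, List.getElem?_eq_getElem (by omega)]
      simp
    have hzip : (s.take h).zip ((s.drop h).reverse) = (s.take (h - 1)).zip ((s.drop h).reverse) := by
      conv_lhs => rw [hsplit]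
      exact zip_append_right_of_length_eq _ _ _ (by simp; omega)
    rw [hzip, ← itl_zip_succ _ _ _ (by simp; omega), ← hsplit]
    have h0cons := List.drop_eq_getElem_cons (show 0 < s.length by omega)
    rw [List.drop_zero] at h0cons
    simp only [Nat.zero_add] at h0cons
    have hcons : s.take h = s[0]'(by omega) :: (s.drop 1).take (h - 1) := by
      conv_lhs => rw [show h = (h - 1) + 1 from by omega, h0cons]
      rw [List.take_succ_cons]
    rw [hcons, itl_cons_left]
    have ht1 : s.take 1 = [s[0]'(by omega)] := by
      conv_lhs => rw [h0cons]
      rfl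
    rw [ht1]
    rfl

theorem adp_shuffle_py_spec : Claim_equal_adp_shuffle_py := by
  intro var0 _
  unfold Spec_adp_shuffle_py
  exact ports_eq var0
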